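-- pv_equiv track=rewrite | github.com/AlokXCoder/SYCS | 06-Theory Of Computation/07-Program for creating a machine which accepts string having equal no 1 and 0..py | getSubStringWithEqual012
-- ===== SOURCE A (Python) =====
-- def getSubStringWithEqual012(s):
--     arr = []
--     n = len(s)
--     for i in range(n):
--         for j in range(i, n):
--             s1 = ""
--             for k in range(i, j + 1):
--                 s1 += s[k]
--             arr.append(s1)
--
--     count = 0
--     for i in range(len(arr)):
--         countZero = 0
--         countOne = 0
--         countTwo = 0
--         curs = arr[i]
--         for j in range(len(curs)):
--             if curs[j] == '0':
--                 countZero += 1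
--             if curs[j] == '1':
--                 countOne += 1
--             if curs[j] == '2':
--                 countTwo += 1
--         if countZero == countOne and countOne == countTwo:
--             count += 1
--
--     return count
-- ===== SOURCE B (Python) =====
-- def getSubStringWithEqual012(s):
--     # O(n): count prefixes sharing the same (ones-zeros, twos-zeros) difference vector
--     total = 0
--     seen = {(0, 0): 1}
--     z = o = t = 0
--     for c in s:
--         if c == '0':
--             z += 1
--         elif c == '1':
--             o += 1
--         elif c == '2':
--             t += 1
--         key = (o - z, t - z)
--         total += seen.get(key, 0)
--         seen[key] = seen.get(key, 0) + 1
--     return total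
-- ===== Notes on version B (the rewrite author's own statement) =====
-- stated objective: faster
-- what changed: Replaced A's enumerate-every-substring-then-recount pipeline (O(n^3) time and space) by a single left-to-right pass that counts, via a hash map, pairs of prefixes with equal (ones-zeros, twos-zeros) difference vectors.
import Mathlib
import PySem

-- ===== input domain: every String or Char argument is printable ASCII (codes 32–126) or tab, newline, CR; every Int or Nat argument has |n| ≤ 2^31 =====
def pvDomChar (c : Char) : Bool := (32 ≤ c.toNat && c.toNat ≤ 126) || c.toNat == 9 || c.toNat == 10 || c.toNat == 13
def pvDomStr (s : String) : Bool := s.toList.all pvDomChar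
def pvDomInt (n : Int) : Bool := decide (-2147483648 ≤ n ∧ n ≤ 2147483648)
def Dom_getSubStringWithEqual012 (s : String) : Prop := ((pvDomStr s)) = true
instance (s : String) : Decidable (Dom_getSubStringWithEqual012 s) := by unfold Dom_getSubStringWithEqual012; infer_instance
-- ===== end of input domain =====

-- B replaces A's materialise-all-substrings-and-scan-each O(n^3) routine by a single O(n) pass
-- counting prefixes with equal difference vectors (ones-zeros, twos-zeros) in a dictionary.

-- ===== PORT A =====
-- s1 built by indexing s[k] for k in range(i, j+1); k is always in range, so getD is exact here
def pvA_build (cs : List Char) (i j : Nat) : List Char :=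
  (List.range' i (j + 1 - i)).foldl (fun s1 k => s1 ++ [cs.getD k ' ']) []

def pvA_arr (cs : List Char) : List (List Char) :=
  (List.range cs.length).foldl (fun arr i =>
    (List.range' i (cs.length - i)).foldl (fun arr j => arr ++ [pvA_build cs i j]) arr) []

def pvA_counts (curs : List Char) : Int × Int × Int :=
  curs.foldl (fun acc c =>
    ((if c = '0' then acc.1 + 1 else acc.1),
     (if c = '1' then acc.2.1 + 1 else acc.2.1),
     (if c = '2' then acc.2.2 + 1 else acc.2.2))) (0, 0, 0)

def getSubStringWithEqual012 (s : String) : Int :=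
  (pvA_arr s.toList).foldl (fun count curs =>
    if (pvA_counts curs).1 = (pvA_counts curs).2.1 ∧
       (pvA_counts curs).2.1 = (pvA_counts curs).2.2 then count + 1 else count) 0

-- ===== PORT B =====
-- the if/elif/elif chain updating the three running counters
def pvB_upd (c : Char) (st : Int × Int × Int) : Int × Int × Int :=
  if c = '0' then (st.1 + 1, st.2.1, st.2.2)
  else if c = '1' then (st.1, st.2.1 + 1, st.2.2)
  else if c = '2' then (st.1, st.2.1, st.2.2 + 1)
  else st

def getSubStringWithEqual012_alt (s : String) : Int :=
  (s.toList.foldl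
    (fun (st : Int × PySem.Dict (Int × Int) Int × Int × Int × Int) c =>
      let cnt := pvB_upd c (st.2.2.1, st.2.2.2.1, st.2.2.2.2)
      let key := (cnt.2.1 - cnt.1, cnt.2.2 - cnt.1)
      let total := st.1 + st.2.1.getD key 0
      let seen := st.2.1.insert key (st.2.1.getD key 0 + 1)
      (total, seen, cnt.1, cnt.2.1, cnt.2.2))
    (0, PySem.Dict.empty.insert ((0 : Int), (0 : Int)) 1, 0, 0, 0)).1

-- ===== PRECONDITION & SPEC =====
def Spec_getSubStringWithEqual012 (s : String) (out : Int) : Prop := out = getSubStringWithEqual012_alt s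
instance (s : String) (out : Int) : Decidable (Spec_getSubStringWithEqual012 s out) := by unfold Spec_getSubStringWithEqual012; infer_instance

-- ===== CLAIM (what is proved, stated in full; the proofs are below) =====
def Claim_equal_getSubStringWithEqual012 : Prop := ∀ (s : String), Dom_getSubStringWithEqual012 s → Spec_getSubStringWithEqual012 s (getSubStringWithEqual012 s)

-- ===== LEMMAS AND PROOFS =====

-- counts of '0','1','2' in a list, as an Int triple
def pvCnts (l : List Char) : Int × Int × Int :=
  ((l.count '0' : Int), (l.count '1' : Int), (l.count '2' : Int))

def pvStadd (a b : Int × Int × Int) : Int × Int × Int :=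
  (a.1 + b.1, a.2.1 + b.2.1, a.2.2 + b.2.2)

-- the difference vector of a counter state
def pvKey (st : Int × Int × Int) : Int × Int :=
  (st.2.1 - st.1, st.2.2 - st.1)

-- difference vectors of the nonempty prefixes, scanned with running state st
def pvK : List Char → (Int × Int × Int) → List (Int × Int)
  | [], _ => []
  | c :: cs, st => pvKey (pvB_upd c st) :: pvK cs (pvB_upd c st)

-- equal-pair count of a list, each pair charged to its earlier endpoint
def pvQ : List (Int × Int) → Int
  | [] => 0
  | v :: l => (l.count v : Int) + pvQ l

-- equal-pair count as B computes it: each new key matched against pfx ++ earlier keys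
def pvQrun : List (Int × Int) → List Char → (Int × Int × Int) → Int
  | _, [], _ => 0
  | pfx, c :: cs, st =>
    (pfx.count (pvKey (pvB_upd c st)) : Int) +
      pvQrun (pfx ++ [pvKey (pvB_upd c st)]) cs (pvB_upd c st)

-- difference vectors of all prefixes (lengths 0..n)
def pvDs (cs : List Char) : List (Int × Int) :=
  (List.range (cs.length + 1)).map (fun k => pvKey (pvCnts (cs.take k)))

theorem pvA_counts_fold (l : List Char) (a b c : Int) :
    l.foldl (fun acc c' =>
      ((if c' = '0' then acc.1 + 1 else acc.1),
       (if c' = '1' then acc.2.1 + 1 else acc.2.1),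
       (if c' = '2' then acc.2.2 + 1 else acc.2.2))) (a, b, c)
    = (a + l.count '0', b + l.count '1', c + l.count '2') := by
  induction l generalizing a b c with
  | nil => simp
  | cons x xs ih =>
    simp only [List.foldl_cons, ih, List.count_cons]
    refine Prod.ext ?_ (Prod.ext ?_ ?_) <;> simp <;> split_ifs <;> push_cast <;> omega

theorem pvA_counts_eq' (l : List Char) : pvA_counts l = pvCnts l := by
  simp [pvA_counts, pvCnts, pvA_counts_fold]

theorem pvB_upd_eq' (c : Char) (st : Int × Int × Int) :
    pvB_upd c st = pvStadd st (pvCnts [c]) := by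
  obtain ⟨z, o, t⟩ := st
  simp only [pvB_upd, pvStadd, pvCnts, List.count_singleton]
  split_ifs <;> simp_all

theorem pvCnts_append' (a b : List Char) : pvCnts (a ++ b) = pvStadd (pvCnts a) (pvCnts b) := by
  simp [pvCnts, pvStadd, List.count_append]

theorem pvStadd_assoc (a b c : Int × Int × Int) :
    pvStadd a (pvStadd b c) = pvStadd (pvStadd a b) c := by
  simp [pvStadd]; omega

theorem pvCnts_cons (c : Char) (l : List Char) :
    pvCnts (c :: l) = pvStadd (pvCnts [c]) (pvCnts l) := by
  simpa using pvCnts_append' [c] l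

theorem pvStadd_zero (x : Int × Int × Int) : pvStadd (0, 0, 0) x = x := by
  obtain ⟨a, b, c⟩ := x; simp [pvStadd]

theorem pvK_eq' (cs : List Char) (st : Int × Int × Int) :
    pvK cs st = (List.range cs.length).map (fun j => pvKey (pvStadd st (pvCnts (cs.take (j + 1))))) := by
  induction cs generalizing st with
  | nil => simp [pvK]
  | cons c cs ih =>
    simp only [pvK, ih, List.length_cons, List.range_succ_eq_map, List.map_cons, List.map_map]
    congr 1
    · simp [pvB_upd_eq', List.take]
    · apply List.map_congr_left
      intro j _
      simp only [Function.comp_apply, List.take_succ_cons]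
      rw [pvCnts_cons, pvStadd_assoc, ← pvB_upd_eq']

theorem pvDs_eq' (cs : List Char) : pvDs cs = (0, 0) :: pvK cs (0, 0, 0) := by
  rw [pvK_eq']
  simp [pvDs, List.range_succ_eq_map, Function.comp_def, pvStadd_zero, pvCnts, pvKey]
theorem pvQrun_cross' (cs : List Char) : ∀ (pfx : List (Int × Int)) (st : Int × Int × Int),
    pvQrun pfx cs st = ((pfx.map (fun v => ((pvK cs st).count v : Int))).sum) + pvQrun [] cs st := by
  induction cs with
  | nil => intro pfx st; simp [pvQrun, pvK]
  | cons c cs ih =>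
    intro pfx st
    simp only [pvQrun, pvK]
    rw [ih (pfx ++ [pvKey (pvB_upd c st)])]
    simp only [List.nil_append]
    rw [ih [pvKey (pvB_upd c st)]]
    simp only [List.map_append, List.sum_append, List.map_cons, List.map_nil, List.sum_cons,
      List.sum_nil, List.count_cons, List.count_nil]
    push_cast
    rw [PySem.List.sum_map_add_int, PySem.List.sum_map_ite_one_zero]
    have hc : pfx.countP (fun v => pvKey (pvB_upd c st) == v) = pfx.count (pvKey (pvB_upd c st)) := by
      simp [List.count_eq_countP', BEq.comm]
    rw [hc]; ring
theorem pvQrun_nil_eq' (cs : List Char) : ∀ (st : Int × Int × Int),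
    pvQrun [] cs st = pvQ (pvK cs st) := by
  induction cs with
  | nil => intro st; simp [pvQrun, pvK, pvQ]
  | cons c cs ih =>
    intro st
    simp only [pvQrun, pvK, pvQ, List.nil_append, List.count_nil]
    rw [pvQrun_cross' cs [pvKey (pvB_upd c st)], ih]
    simp

theorem pvB_inv' (cs : List Char) : ∀ (total : Int) (seen : PySem.Dict (Int × Int) Int)
    (z o t : Int) (pfx : List (Int × Int))
    (_ : ∀ v, seen.getD v 0 = (pfx.count v : Int)),
    (cs.foldl
      (fun (st : Int × PySem.Dict (Int × Int) Int × Int × Int × Int) c =>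
        let cnt := pvB_upd c (st.2.2.1, st.2.2.2.1, st.2.2.2.2)
        let key := (cnt.2.1 - cnt.1, cnt.2.2 - cnt.1)
        let total := st.1 + st.2.1.getD key 0
        let seen := st.2.1.insert key (st.2.1.getD key 0 + 1)
        (total, seen, cnt.1, cnt.2.1, cnt.2.2))
      (total, seen, z, o, t)).1 = total + pvQrun pfx cs (z, o, t) := by
  induction cs with
  | nil => intro total seen z o t pfx h; simp [pvQrun]
  | cons c cs ih =>
    intro total seen z o t pfx h
    simp only [List.foldl_cons]
    have hkey : ((pvB_upd c (z, o, t)).2.1 - (pvB_upd c (z, o, t)).1,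
                 (pvB_upd c (z, o, t)).2.2 - (pvB_upd c (z, o, t)).1)
        = pvKey (pvB_upd c (z, o, t)) := rfl
    rw [show pvQrun pfx (c :: cs) (z, o, t)
        = (pfx.count (pvKey (pvB_upd c (z, o, t))) : Int) +
          pvQrun (pfx ++ [pvKey (pvB_upd c (z, o, t))]) cs (pvB_upd c (z, o, t)) from rfl]
    have h' : ∀ v, (seen.insert (pvKey (pvB_upd c (z, o, t)))
          (seen.getD (pvKey (pvB_upd c (z, o, t))) 0 + 1)).getD v 0
        = ((pfx ++ [pvKey (pvB_upd c (z, o, t))]).count v : Int) := by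
      intro v
      rw [PySem.Dict.getD_insert]
      simp only [List.count_append, List.count_singleton, h]
      simp only [beq_iff_eq]
      split_ifs with h1 h2 h2
      · subst h1; push_cast; ring
      · exact absurd h1.symm h2
      · exact absurd h2.symm h1
      · push_cast; ring
    have := ih (total + seen.getD (pvKey (pvB_upd c (z, o, t))) 0)
      (seen.insert (pvKey (pvB_upd c (z, o, t))) (seen.getD (pvKey (pvB_upd c (z, o, t))) 0 + 1))
      (pvB_upd c (z, o, t)).1 (pvB_upd c (z, o, t)).2.1 (pvB_upd c (z, o, t)).2.2
      (pfx ++ [pvKey (pvB_upd c (z, o, t))]) h'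
    simp only [hkey] at this ⊢
    rw [this, h]
    ring
theorem pvB_eq_Q' (s : String) : getSubStringWithEqual012_alt s = pvQ (pvDs s.toList) := by
  unfold getSubStringWithEqual012_alt
  rw [pvB_inv' s.toList 0 _ 0 0 0 [((0 : Int), (0 : Int))] ?hseen]
  case hseen =>
    intro v
    rw [PySem.Dict.getD_insert]
    simp only [List.count_singleton, PySem.Dict.getD_empty, beq_iff_eq]
    split_ifs <;> simp_all
  rw [pvQrun_cross' _ [((0 : Int), (0 : Int))] _, pvQrun_nil_eq', pvDs_eq']
  simp [pvQ]

theorem pvQ_eq_sum' (l : List (Int × Int)) :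
    pvQ l = ((List.range l.length).map
      (fun i => (((l.drop (i + 1)).count (l.getD i (0, 0)) : Int)))).sum := by
  induction l with
  | nil => simp [pvQ]
  | cons v l ih =>
    simp only [pvQ, List.length_cons, List.range_succ_eq_map, List.map_cons, List.map_map,
      List.sum_cons, ih]
    refine congrArg₂ (· + ·) ?_ (congrArg List.sum (List.map_congr_left ?_))
    · simp
    · intro i _
      simp

theorem pvBuild_eq' (cs : List Char) : ∀ (i m : Nat), i + m ≤ cs.length →
    (List.range' i m).map (fun k => cs.getD k ' ') = (cs.drop i).take m := by
  intro i m
  induction m generalizing i with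
  | zero => simp
  | succ m ih =>
    intro h
    have hi : i < cs.length := by omega
    rw [List.range'_succ, List.map_cons, ih (i + 1) (by omega), List.drop_eq_getElem_cons hi,
      List.take_succ_cons]
    simp [List.getElem?_eq_getElem hi]

theorem pvFlatten_map_singleton {a b : Type} (f : a -> b) (l : List a) :
    (l.map (fun x => [f x])).flatten = l.map f := by
  induction l <;> simp_all

theorem pvA_build_map (cs : List Char) (i j : Nat) :
    pvA_build cs i j = (List.range' i (j + 1 - i)).map (fun k => cs.getD k ' ') := by
  simp [pvA_build, pvFlatten_map_singleton]

theorem pvA_arr_eq (cs : List Char) :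
    pvA_arr cs = (List.range cs.length).flatMap
      (fun i => (List.range' i (cs.length - i)).map (fun j => pvA_build cs i j)) := by
  simp [pvA_arr, pvFlatten_map_singleton, List.flatMap_def]

theorem pvCountP_flatMap {α β : Type} (l : List α) (f : α → List β) (p : β → Bool) :
    (l.flatMap f).countP p = (l.map (fun x => (f x).countP p)).sum := by
  induction l with
  | nil => simp
  | cons x xs ih => simp [List.flatMap_cons, List.countP_append, ih]

theorem pvDs_getD (cs : List Char) (i : Nat) (h : i ≤ cs.length) :
    (pvDs cs).getD i (0, 0) = pvKey (pvCnts (cs.take i)) := by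
  have hl : i < (pvDs cs).length := by simp [pvDs]; omega
  rw [List.getD_eq_getElem _ _ hl]
  simp [pvDs]

theorem pvDs_drop (cs : List Char) (i : Nat) (h : i ≤ cs.length) :
    (pvDs cs).drop (i + 1) = (List.range' (i + 1) (cs.length - i)).map
      (fun k => pvKey (pvCnts (cs.take k))) := by
  have h2 : cs.length + 1 - (i + 1) = cs.length - i := by omega
  rw [pvDs, ← List.map_drop, List.range_eq_range', List.drop_range', Nat.zero_add, h2, mul_one]

theorem pvPointwise (cs : List Char) (i j : Nat) (hij : i ≤ j) (hj : j < cs.length) :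
    ((pvA_counts (pvA_build cs i j)).1 = (pvA_counts (pvA_build cs i j)).2.1 ∧
     (pvA_counts (pvA_build cs i j)).2.1 = (pvA_counts (pvA_build cs i j)).2.2)
    ↔ pvKey (pvCnts (cs.take (j + 1))) = pvKey (pvCnts (cs.take i)) := by
  rw [pvA_build_map, pvBuild_eq' cs i (j + 1 - i) (by omega), pvA_counts_eq']
  have hsplit : cs.take (j + 1) = cs.take i ++ (cs.drop i).take (j + 1 - i) := by
    conv_lhs => rw [show j + 1 = i + (j + 1 - i) from by omega]
    exact List.take_add
  rw [hsplit, pvCnts_append']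
  simp only [pvKey, pvStadd, pvCnts, Prod.ext_iff]
  omega
theorem pvInner (cs : List Char) (i : Nat) (hi : i < cs.length) :
    ((List.range' i (cs.length - i)).map (fun j => pvA_build cs i j)).countP
      (fun curs => decide ((pvA_counts curs).1 = (pvA_counts curs).2.1 ∧
        (pvA_counts curs).2.1 = (pvA_counts curs).2.2))
    = ((pvDs cs).drop (i + 1)).count ((pvDs cs).getD i (0, 0)) := by
  rw [List.countP_map, pvDs_drop cs i hi.le, pvDs_getD cs i hi.le, List.count_eq_countP,
    List.countP_map]
  have hr : List.range' (i + 1) (cs.length - i) = (List.range' i (cs.length - i)).map (1 + ·) := by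
    rw [List.map_add_range', Nat.add_comm 1 i]
  rw [hr, List.countP_map]
  apply List.countP_congr
  intro j hj
  have hj' : i ≤ j ∧ j < i + (cs.length - i) := List.mem_range'_1.mp hj
  have hpt := pvPointwise cs i j hj'.1 (by omega)
  simp only [Function.comp_apply, show 1 + j = j + 1 from by omega, beq_iff_eq]
  simp [hpt]

theorem pvA_eq_Q' (s : String) : getSubStringWithEqual012 s = pvQ (pvDs s.toList) := by
  unfold getSubStringWithEqual012
  rw [PySem.List.foldl_ite_add_one, pvA_arr_eq, pvCountP_flatMap, pvQ_eq_sum']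
  have hlen : (pvDs s.toList).length = s.toList.length + 1 := by simp [pvDs]
  rw [hlen, List.range_succ, List.map_append, List.sum_append]
  have hnil : (pvDs s.toList).drop (s.toList.length + 1) = [] :=
    List.drop_eq_nil_of_le (by omega)
  rw [List.map_singleton, List.sum_singleton, hnil]
  simp only [List.count_nil, Nat.cast_zero, add_zero, zero_add, Nat.cast_list_sum, List.map_map]
  refine congrArg List.sum (List.map_congr_left ?_)
  intro i hi
  have hi' : i < s.toList.length := List.mem_range.mp hi
  simp only [Function.comp_apply, pvInner s.toList i hi']

-- ===== VERDICT (by name: the statement is the Claim_ definition above) =====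
theorem getSubStringWithEqual012_spec : Claim_equal_getSubStringWithEqual012 := by
  intro s _
  unfold Spec_getSubStringWithEqual012
  rw [pvA_eq_Q', pvB_eq_Q']
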